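-- pv_equiv track=rewrite | github.com/rustinpartow/noodle_music | soundfont_research/analyze_soundfonts.py | categorize_by_name
-- ===== SOURCE A (Python) =====
-- def categorize_by_name(name):
--     name_lower = name.lower()
--
--     # Genre categories
--     if any(x in name_lower for x in ['rock', 'metal', 'distort', 'guitar']):
--         return 'Rock/Guitar'
--     elif any(x in name_lower for x in ['drum', 'kit', 'percussion']):
--         return 'Drums'
--     elif any(x in name_lower for x in ['orchestra', 'symphony', 'classical', 'violin', 'piano']):
--         return 'Classical/Orchestral'
--     elif any(x in name_lower for x in ['synth', 'electronic', 'techno', 'dance']):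
--         return 'Electronic/Synth'
--     elif any(x in name_lower for x in ['jazz', 'blues', 'funk']):
--         return 'Jazz/Blues'
--     elif any(x in name_lower for x in ['vintage', 'retro', '8bit', '16bit', 'chip']):
--         return 'Retro/Chiptune'
--     elif any(x in name_lower for x in ['bass', 'acoustic']):
--         return 'Bass/Acoustic'
--     elif any(x in name_lower for x in ['general', 'gm', 'gs', 'xg', 'complete', 'full']):
--         return 'General Purpose'
--     else:
--         return 'Other'
-- ===== SOURCE B (Python) =====
-- # Flat keyword -> (priority, category) map; single pass keeping the minimum-priority match.
-- KEYWORD_MAP = {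
--     'rock': (0, 'Rock/Guitar'), 'metal': (0, 'Rock/Guitar'),
--     'distort': (0, 'Rock/Guitar'), 'guitar': (0, 'Rock/Guitar'),
--     'drum': (1, 'Drums'), 'kit': (1, 'Drums'), 'percussion': (1, 'Drums'),
--     'orchestra': (2, 'Classical/Orchestral'), 'symphony': (2, 'Classical/Orchestral'),
--     'classical': (2, 'Classical/Orchestral'), 'violin': (2, 'Classical/Orchestral'),
--     'piano': (2, 'Classical/Orchestral'),
--     'synth': (3, 'Electronic/Synth'), 'electronic': (3, 'Electronic/Synth'),
--     'techno': (3, 'Electronic/Synth'), 'dance': (3, 'Electronic/Synth'),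
--     'jazz': (4, 'Jazz/Blues'), 'blues': (4, 'Jazz/Blues'), 'funk': (4, 'Jazz/Blues'),
--     'vintage': (5, 'Retro/Chiptune'), 'retro': (5, 'Retro/Chiptune'),
--     '8bit': (5, 'Retro/Chiptune'), '16bit': (5, 'Retro/Chiptune'),
--     'chip': (5, 'Retro/Chiptune'),
--     'bass': (6, 'Bass/Acoustic'), 'acoustic': (6, 'Bass/Acoustic'),
--     'general': (7, 'General Purpose'), 'gm': (7, 'General Purpose'),
--     'gs': (7, 'General Purpose'), 'xg': (7, 'General Purpose'),
--     'complete': (7, 'General Purpose'), 'full': (7, 'General Purpose'),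
-- }
--
-- def categorize_by_name(name):
--     name_lower = name.lower()
--     best = None
--     for keyword, pc in KEYWORD_MAP.items():
--         if keyword in name_lower and (best is None or pc[0] < best[0]):
--             best = pc
--     return best[1] if best is not None else 'Other'
-- ===== Notes on version B (the rewrite author's own statement) =====
-- stated objective: alternative
-- what changed: Replaced the ordered if/elif early-return dispatch chain with a flat keyword->(priority,category) map scanned in a single pass that keeps the minimum-priority matching keyword in an accumulator.
import Mathlib
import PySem

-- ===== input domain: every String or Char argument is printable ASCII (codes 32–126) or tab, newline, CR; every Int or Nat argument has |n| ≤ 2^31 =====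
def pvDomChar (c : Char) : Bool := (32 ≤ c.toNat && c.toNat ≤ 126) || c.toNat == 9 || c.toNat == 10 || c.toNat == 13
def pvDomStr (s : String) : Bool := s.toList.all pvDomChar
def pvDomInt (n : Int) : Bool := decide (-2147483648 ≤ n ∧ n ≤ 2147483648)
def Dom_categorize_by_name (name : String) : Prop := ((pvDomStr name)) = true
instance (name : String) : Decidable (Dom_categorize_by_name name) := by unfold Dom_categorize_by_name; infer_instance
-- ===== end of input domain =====

-- B replaces A's if/elif early-return dispatch chain with a flat keyword->(priority,category) map
-- scanned in one pass keeping the minimum-priority match (alternative decomposition, same cost).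

-- ===== PORT A =====
def categorize_by_name (name : String) : String :=
  let name_lower := PySem.Str.lower name
  if ["rock", "metal", "distort", "guitar"].any (fun x => PySem.Str.isIn x name_lower) then
    "Rock/Guitar"
  else if ["drum", "kit", "percussion"].any (fun x => PySem.Str.isIn x name_lower) then
    "Drums"
  else if ["orchestra", "symphony", "classical", "violin", "piano"].any (fun x => PySem.Str.isIn x name_lower) then
    "Classical/Orchestral"
  else if ["synth", "electronic", "techno", "dance"].any (fun x => PySem.Str.isIn x name_lower) then
    "Electronic/Synth"
  else if ["jazz", "blues", "funk"].any (fun x => PySem.Str.isIn x name_lower) then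
    "Jazz/Blues"
  else if ["vintage", "retro", "8bit", "16bit", "chip"].any (fun x => PySem.Str.isIn x name_lower) then
    "Retro/Chiptune"
  else if ["bass", "acoustic"].any (fun x => PySem.Str.isIn x name_lower) then
    "Bass/Acoustic"
  else if ["general", "gm", "gs", "xg", "complete", "full"].any (fun x => PySem.Str.isIn x name_lower) then
    "General Purpose"
  else
    "Other"

-- ===== PORT B =====
-- the flat dict KEYWORD_MAP, in insertion order
def KEYWORD_MAP : List (String × Int × String) :=
  [ ("rock", 0, "Rock/Guitar"), ("metal", 0, "Rock/Guitar"), ("distort", 0, "Rock/Guitar"), ("guitar", 0, "Rock/Guitar"),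
    ("drum", 1, "Drums"), ("kit", 1, "Drums"), ("percussion", 1, "Drums"),
    ("orchestra", 2, "Classical/Orchestral"), ("symphony", 2, "Classical/Orchestral"), ("classical", 2, "Classical/Orchestral"), ("violin", 2, "Classical/Orchestral"), ("piano", 2, "Classical/Orchestral"),
    ("synth", 3, "Electronic/Synth"), ("electronic", 3, "Electronic/Synth"), ("techno", 3, "Electronic/Synth"), ("dance", 3, "Electronic/Synth"),
    ("jazz", 4, "Jazz/Blues"), ("blues", 4, "Jazz/Blues"), ("funk", 4, "Jazz/Blues"),
    ("vintage", 5, "Retro/Chiptune"), ("retro", 5, "Retro/Chiptune"), ("8bit", 5, "Retro/Chiptune"), ("16bit", 5, "Retro/Chiptune"), ("chip", 5, "Retro/Chiptune"),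
    ("bass", 6, "Bass/Acoustic"), ("acoustic", 6, "Bass/Acoustic"),
    ("general", 7, "General Purpose"), ("gm", 7, "General Purpose"), ("gs", 7, "General Purpose"), ("xg", 7, "General Purpose"), ("complete", 7, "General Purpose"), ("full", 7, "General Purpose") ]

-- the loop body: replace the held best by a match of strictly smaller priority
def pickBest (name_lower : String) (best : Option (Int × String)) (e : String × Int × String) :
    Option (Int × String) :=
  if PySem.Str.isIn e.1 name_lower && (match best with | none => true | some pc => decide (e.2.1 < pc.1)) then
    some e.2
  else best

def categorize_by_name_alt (name : String) : String :=
  let name_lower := PySem.Str.lower name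
  match KEYWORD_MAP.foldl (pickBest name_lower) none with
  | some pc => pc.2
  | none => "Other"

-- ===== PRECONDITION & SPEC =====
def Spec_categorize_by_name (name : String) (out : String) : Prop := out = categorize_by_name_alt name
instance (name : String) (out : String) : Decidable (Spec_categorize_by_name name out) := by unfold Spec_categorize_by_name; infer_instance

-- ===== CLAIM (what is proved, stated in full; the proofs are below) =====
def Claim_equal_categorize_by_name : Prop := ∀ (name : String), Dom_categorize_by_name name → Spec_categorize_by_name name (categorize_by_name name)

-- ===== LEMMAS AND PROOFS =====

-- the groups of KEYWORD_MAP, one per category, in priority order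
def G0 : List (String × Int × String) := [("rock", (0:Int), "Rock/Guitar"), ("metal", 0, "Rock/Guitar"), ("distort", 0, "Rock/Guitar"), ("guitar", 0, "Rock/Guitar")]
def G1 : List (String × Int × String) := [("drum", (1:Int), "Drums"), ("kit", 1, "Drums"), ("percussion", 1, "Drums")]
def G2 : List (String × Int × String) := [("orchestra", (2:Int), "Classical/Orchestral"), ("symphony", 2, "Classical/Orchestral"), ("classical", 2, "Classical/Orchestral"), ("violin", 2, "Classical/Orchestral"), ("piano", 2, "Classical/Orchestral")]
def G3 : List (String × Int × String) := [("synth", (3:Int), "Electronic/Synth"), ("electronic", 3, "Electronic/Synth"), ("techno", 3, "Electronic/Synth"), ("dance", 3, "Electronic/Synth")]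
def G4 : List (String × Int × String) := [("jazz", (4:Int), "Jazz/Blues"), ("blues", 4, "Jazz/Blues"), ("funk", 4, "Jazz/Blues")]
def G5 : List (String × Int × String) := [("vintage", (5:Int), "Retro/Chiptune"), ("retro", 5, "Retro/Chiptune"), ("8bit", 5, "Retro/Chiptune"), ("16bit", 5, "Retro/Chiptune"), ("chip", 5, "Retro/Chiptune")]
def G6 : List (String × Int × String) := [("bass", (6:Int), "Bass/Acoustic"), ("acoustic", 6, "Bass/Acoustic")]
def G7 : List (String × Int × String) := [("general", (7:Int), "General Purpose"), ("gm", 7, "General Purpose"), ("gs", 7, "General Purpose"), ("xg", 7, "General Purpose"), ("complete", 7, "General Purpose"), ("full", 7, "General Purpose")]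

-- once some v is held and no later entry has priority below v.1, the fold keeps v
theorem pickBest_stay (nl : String) (v : Int × String)
    (l : List (String × Int × String)) (h : ∀ e ∈ l, ¬ (e.2.1 < v.1)) :
    l.foldl (pickBest nl) (some v) = some v := by
  induction l with
  | nil => rfl
  | cons e l ih =>
    have he : ¬ (e.2.1 < v.1) := h e (by simp)
    have hstep : pickBest nl (some v) e = some v := by
      unfold pickBest; simp [he]
    rw [List.foldl_cons, hstep]
    exact ih (fun e' h' => h e' (by simp [h']))

-- a group whose every entry carries the same (priority, category) v, folded from none
theorem pickBest_group (nl : String) (v : Int × String)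
    (l : List (String × Int × String)) (h : ∀ e ∈ l, e.2 = v) :
    l.foldl (pickBest nl) none =
      if l.any (fun e => PySem.Str.isIn e.1 nl) then some v else none := by
  induction l with
  | nil => rfl
  | cons e l ih =>
    have he : e.2 = v := h e (by simp)
    cases hin : PySem.Str.isIn e.1 nl with
    | true =>
      have hstep : pickBest nl none e = some v := by
        unfold pickBest; rw [hin]; simp [he]
      rw [List.foldl_cons, hstep,
        pickBest_stay nl v l (fun e' h' => by rw [h e' (by simp [h'])]; simp)]
      simp only [List.any_cons, hin, Bool.true_or]
      rfl
    | false =>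
      have hstep : pickBest nl none e = none := by
        unfold pickBest; rw [hin]; simp
      rw [List.foldl_cons, hstep, ih (fun e' h' => h e' (by simp [h']))]
      simp only [List.any_cons, hin, Bool.false_or]

-- each group's match test coincides with A's keyword test (definitional)
theorem anyG0 (nl : String) : (G0.any (fun e => PySem.Str.isIn e.1 nl)) = (["rock", "metal", "distort", "guitar"].any (fun x => PySem.Str.isIn x nl)) := rfl
theorem anyG1 (nl : String) : (G1.any (fun e => PySem.Str.isIn e.1 nl)) = (["drum", "kit", "percussion"].any (fun x => PySem.Str.isIn x nl)) := rfl
theorem anyG2 (nl : String) : (G2.any (fun e => PySem.Str.isIn e.1 nl)) = (["orchestra", "symphony", "classical", "violin", "piano"].any (fun x => PySem.Str.isIn x nl)) := rfl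
theorem anyG3 (nl : String) : (G3.any (fun e => PySem.Str.isIn e.1 nl)) = (["synth", "electronic", "techno", "dance"].any (fun x => PySem.Str.isIn x nl)) := rfl
theorem anyG4 (nl : String) : (G4.any (fun e => PySem.Str.isIn e.1 nl)) = (["jazz", "blues", "funk"].any (fun x => PySem.Str.isIn x nl)) := rfl
theorem anyG5 (nl : String) : (G5.any (fun e => PySem.Str.isIn e.1 nl)) = (["vintage", "retro", "8bit", "16bit", "chip"].any (fun x => PySem.Str.isIn x nl)) := rfl
theorem anyG6 (nl : String) : (G6.any (fun e => PySem.Str.isIn e.1 nl)) = (["bass", "acoustic"].any (fun x => PySem.Str.isIn x nl)) := rfl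
theorem anyG7 (nl : String) : (G7.any (fun e => PySem.Str.isIn e.1 nl)) = (["general", "gm", "gs", "xg", "complete", "full"].any (fun x => PySem.Str.isIn x nl)) := rfl

-- KEYWORD_MAP split into its category groups (definitional)
theorem KEYWORD_MAP_eq_groups : KEYWORD_MAP = G0 ++ (G1 ++ (G2 ++ (G3 ++ (G4 ++ (G5 ++ (G6 ++ G7)))))) := rfl

-- ===== VERDICT (by name: the statement is the Claim_ definition above) =====
theorem categorize_by_name_spec : Claim_equal_categorize_by_name := by
  intro name _
  unfold Spec_categorize_by_name categorize_by_name categorize_by_name_alt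
  dsimp only
  generalize PySem.Str.lower name = nl
  rw [KEYWORD_MAP_eq_groups]
  rw [List.foldl_append]
  rw [pickBest_group nl ((0:Int), "Rock/Guitar") G0 (by decide)]
  rw [anyG0]
  by_cases h0 : (["rock", "metal", "distort", "guitar"].any (fun x => PySem.Str.isIn x nl)) = true
  · simp only [if_pos h0]
    rw [pickBest_stay nl ((0:Int), "Rock/Guitar") (G1 ++ (G2 ++ (G3 ++ (G4 ++ (G5 ++ (G6 ++ (G7))))))) (by decide)]
  · simp only [if_neg h0]
    rw [List.foldl_append]
    rw [pickBest_group nl ((1:Int), "Drums") G1 (by decide)]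
    rw [anyG1]
    by_cases h1 : (["drum", "kit", "percussion"].any (fun x => PySem.Str.isIn x nl)) = true
    · simp only [if_pos h1]
      rw [pickBest_stay nl ((1:Int), "Drums") (G2 ++ (G3 ++ (G4 ++ (G5 ++ (G6 ++ (G7)))))) (by decide)]
    · simp only [if_neg h1]
      rw [List.foldl_append]
      rw [pickBest_group nl ((2:Int), "Classical/Orchestral") G2 (by decide)]
      rw [anyG2]
      by_cases h2 : (["orchestra", "symphony", "classical", "violin", "piano"].any (fun x => PySem.Str.isIn x nl)) = true
      · simp only [if_pos h2]
        rw [pickBest_stay nl ((2:Int), "Classical/Orchestral") (G3 ++ (G4 ++ (G5 ++ (G6 ++ (G7))))) (by decide)]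
      · simp only [if_neg h2]
        rw [List.foldl_append]
        rw [pickBest_group nl ((3:Int), "Electronic/Synth") G3 (by decide)]
        rw [anyG3]
        by_cases h3 : (["synth", "electronic", "techno", "dance"].any (fun x => PySem.Str.isIn x nl)) = true
        · simp only [if_pos h3]
          rw [pickBest_stay nl ((3:Int), "Electronic/Synth") (G4 ++ (G5 ++ (G6 ++ (G7)))) (by decide)]
        · simp only [if_neg h3]
          rw [List.foldl_append]
          rw [pickBest_group nl ((4:Int), "Jazz/Blues") G4 (by decide)]
          rw [anyG4]
          by_cases h4 : (["jazz", "blues", "funk"].any (fun x => PySem.Str.isIn x nl)) = true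
          · simp only [if_pos h4]
            rw [pickBest_stay nl ((4:Int), "Jazz/Blues") (G5 ++ (G6 ++ (G7))) (by decide)]
          · simp only [if_neg h4]
            rw [List.foldl_append]
            rw [pickBest_group nl ((5:Int), "Retro/Chiptune") G5 (by decide)]
            rw [anyG5]
            by_cases h5 : (["vintage", "retro", "8bit", "16bit", "chip"].any (fun x => PySem.Str.isIn x nl)) = true
            · simp only [if_pos h5]
              rw [pickBest_stay nl ((5:Int), "Retro/Chiptune") (G6 ++ (G7)) (by decide)]
            · simp only [if_neg h5]
              rw [List.foldl_append]
              rw [pickBest_group nl ((6:Int), "Bass/Acoustic") G6 (by decide)]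
              rw [anyG6]
              by_cases h6 : (["bass", "acoustic"].any (fun x => PySem.Str.isIn x nl)) = true
              · simp only [if_pos h6]
                rw [pickBest_stay nl ((6:Int), "Bass/Acoustic") (G7) (by decide)]
              · simp only [if_neg h6]
                rw [pickBest_group nl ((7:Int), "General Purpose") G7 (by decide)]
                rw [anyG7]
                by_cases h7 : (["general", "gm", "gs", "xg", "complete", "full"].any (fun x => PySem.Str.isIn x nl)) = true
                · simp only [if_pos h7]
                · simp only [if_neg h7]
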